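-- pv_equiv track=rewrite | github.com/larsonost/streamlit_kits | helpers.py | format_instagram_comments
-- ===== SOURCE A (Python) =====
-- def format_instagram_comments(instagram) -> list:
--     # Collect comments
--     lines = [comment.strip() for comment in instagram]
--
--     comments = []
--     for i, line in enumerate(lines):
--         if line.strip() == "":
--             if i + 2 < len(lines):
--                 comments.append(lines[i + 2].strip())
--
--     return comments
-- ===== SOURCE B (Python) =====
-- def format_instagram_comments(instagram) -> list:
--     # Single reverse pass with a two-line lookahead buffer (state machine):
--     # scanning from the end, nxt2 always holds the stripped line two positions
--     # after the current one, so a blank current line emits nxt2 directly.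
--     # Output is built back-to-front and reversed once at the end.
--     comments = []
--     nxt1 = None  # stripped line one position after the current one
--     nxt2 = None  # stripped line two positions after the current one
--     for line in reversed(instagram):
--         s = line.strip()
--         if nxt2 is not None and s == "":
--             comments.append(nxt2)
--         nxt1, nxt2 = s, nxt1
--     comments.reverse()
--     return comments
-- ===== Notes on version B (the rewrite author's own statement) =====
-- stated objective: alternative
-- what changed: Replaces the forward enumerate loop over a pre-built stripped list with index arithmetic, a bounds check and lines[i+2] lookups by a single reverse scan carrying a two-line lookahead buffer as state (no indexing, no slicing, no intermediate list), building the output back-to-front and reversing it once.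
import Mathlib
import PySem

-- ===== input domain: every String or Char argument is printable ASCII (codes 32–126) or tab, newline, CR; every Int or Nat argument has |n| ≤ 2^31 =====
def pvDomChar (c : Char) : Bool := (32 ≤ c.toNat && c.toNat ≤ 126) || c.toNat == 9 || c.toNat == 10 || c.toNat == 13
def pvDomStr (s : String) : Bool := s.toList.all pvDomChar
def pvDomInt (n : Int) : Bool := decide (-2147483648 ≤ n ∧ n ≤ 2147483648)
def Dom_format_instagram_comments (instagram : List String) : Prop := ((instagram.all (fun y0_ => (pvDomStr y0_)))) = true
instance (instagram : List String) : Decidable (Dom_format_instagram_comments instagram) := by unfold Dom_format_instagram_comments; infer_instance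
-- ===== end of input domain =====

-- B replaces the forward indexed loop over a pre-built stripped list by a single reverse
-- scan carrying a two-line lookahead buffer as state, building the output back-to-front:
-- an alternative traversal of the same cost.

-- ===== PORT A =====
def format_instagram_comments (instagram : List String) : List String :=
  -- lines = [comment.strip() for comment in instagram]
  let lines := instagram.map PySem.Str.strip
  -- for i, line in enumerate(lines): if line.strip() == "": if i+2 < len(lines): append(lines[i+2].strip())
  (PySem.List.enumerate lines 0).foldl
    (fun comments p =>
      if PySem.Str.strip p.2 = "" then
        if p.1 + 2 < (lines.length : Int) then
          comments ++ [PySem.Str.strip ((PySem.List.pyGet? lines (p.1 + 2)).getD "")]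
        else comments
      else comments) []

-- ===== PORT B =====
-- one step of the reverse scan: state = (comments so far, nxt1, nxt2)
def pvBStep (st : List String × Option String × Option String) (line : String) :
    List String × Option String × Option String :=
  let s := PySem.Str.strip line
  match st with
  | (comments, n1, n2) =>
    ((match n2 with
      | some t => if s = "" then comments ++ [t] else comments
      | none => comments), some s, n1)

def format_instagram_comments_alt (instagram : List String) : List String :=
  -- for line in reversed(instagram): … ; comments.reverse()
  ((instagram.reverse.foldl pvBStep ([], none, none)).1).reverse

-- ===== PRECONDITION & SPEC =====
def Spec_format_instagram_comments (instagram : List String) (out : List String) : Prop := out = format_instagram_comments_alt instagram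
instance (instagram : List String) (out : List String) : Decidable (Spec_format_instagram_comments instagram out) := by unfold Spec_format_instagram_comments; infer_instance

-- ===== CLAIM (what is proved, stated in full; the proofs are below) =====
def Claim_equal_format_instagram_comments : Prop := ∀ (instagram : List String), Dom_format_instagram_comments instagram → Spec_format_instagram_comments instagram (format_instagram_comments instagram)

-- ===== LEMMAS AND PROOFS =====

-- common reference value both ports are reduced to
def pvZipSpec (l : List String) : List String :=
  ((l.zip (l.drop 2)).filter (fun p => PySem.Str.strip p.1 == "")).map
    (fun p => PySem.Str.strip p.2)

-- Chars.rstrip is Mathlib's rdropWhile.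
theorem pv_rstrip_eq_rdropWhile (cs : List Char) :
    PySem.Chars.rstrip cs = List.rdropWhile PySem.Chars.isspace cs := rfl

-- .strip() is idempotent (on the code-point list).
theorem pv_chars_strip_idem (cs : List Char) :
    PySem.Chars.strip (PySem.Chars.strip cs) = PySem.Chars.strip cs := by
  simp only [PySem.Chars.strip, pv_rstrip_eq_rdropWhile]
  set p := PySem.Chars.isspace with hp
  set v := PySem.Chars.lstrip cs with hv
  set t := List.rdropWhile p v with ht
  have hpre : t <+: v := by rw [ht]; exact List.rdropWhile_prefix p v
  have hlt : PySem.Chars.lstrip t = t := by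
    simp only [PySem.Chars.lstrip]
    rw [List.dropWhile_eq_self_iff]
    intro hl hpt
    have hvl : 0 < v.length := lt_of_lt_of_le hl hpre.length_le
    have hget := hpre.getElem hl
    have hv0 : ¬ p (v[0]'hvl) := by
      have := List.dropWhile_get_zero_not (p := p) cs (by simpa [hv, PySem.Chars.lstrip] using hvl)
      simpa [hv, PySem.Chars.lstrip] using this
    exact hv0 (hget ▸ hpt)
  rw [hlt, ht, List.rdropWhile_idempotent]

-- .strip() is idempotent (String level).
theorem pv_strip_idem (s : String) :
    PySem.Str.strip (PySem.Str.strip s) = PySem.Str.strip s := by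
  apply String.ext
  simp [PySem.Str.strip, pv_chars_strip_idem]

-- A-side loop invariant: A's enumerate-fold over the stripped suffix starting at index k
-- produces the zip-filter-map of that suffix against l.drop (k+2).
theorem pv_fold_aux (l : List String) :
    ∀ (ys : List String) (k : Nat), ys = l.drop k →
    ∀ (acc : List String),
      (PySem.List.enumerate (ys.map PySem.Str.strip) (k : Int)).foldl
        (fun comments p =>
          if PySem.Str.strip p.2 = "" then
            if p.1 + 2 < ((l.map PySem.Str.strip).length : Int) then
              comments ++ [PySem.Str.strip ((PySem.List.pyGet? (l.map PySem.Str.strip) (p.1 + 2)).getD "")]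
            else comments
          else comments) acc
      = acc ++ ((ys.zip (l.drop (k + 2))).filter
            (fun p => PySem.Str.strip p.1 == "")).map (fun p => PySem.Str.strip p.2) := by
  intro ys
  induction ys with
  | nil =>
    intro k hk acc
    simp [PySem.List.enumerate_nil]
  | cons y ys ih =>
    intro k hk acc
    have hys : ys = l.drop (k + 1) := by
      have := congrArg List.tail hk
      simpa [List.tail_drop] using this
    have hk1 : ((k : Int) + 1) = ((k + 1 : Nat) : Int) := by push_cast; ring
    simp only [List.map_cons, PySem.List.enumerate_cons, List.foldl_cons]
    rcases hdrop : l.drop (k + 2) with _ | ⟨a, rest⟩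
    · -- k+2 is past the end: guard is false, zip is empty
      have hlen : l.length ≤ k + 2 := by
        have := List.drop_eq_nil_iff.mp hdrop
        omega
      have hguard : ¬ ((k : Int) + 2 < ((l.map PySem.Str.strip).length : Int)) := by
        simp only [List.length_map]
        exact_mod_cast by omega
      have hdrop3 : l.drop (k + 1 + 2) = [] := List.drop_eq_nil_iff.mpr (by omega)
      rw [show (if PySem.Str.strip (PySem.Str.strip y) = "" then
            if ((k : Int), PySem.Str.strip y).1 + 2 < ((l.map PySem.Str.strip).length : Int) then
              acc ++ [PySem.Str.strip ((PySem.List.pyGet? (l.map PySem.Str.strip) (((k : Int), PySem.Str.strip y).1 + 2)).getD "")]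
            else acc
          else acc) = acc from by split_ifs <;> simp_all]
      rw [hk1, ih (k + 1) hys acc, hys, hdrop3]
      simp
    · -- the line two ahead exists
      have hlen : k + 2 < l.length := by
        by_contra h
        have : l.drop (k + 2) = [] := List.drop_eq_nil_iff.mpr (by omega)
        simp [this] at hdrop
      have ha : l[k + 2]? = some a := by
        rw [← List.head?_drop, hdrop]; rfl
      have hrest : rest = l.drop (k + 1 + 2) := by
        have h2 := congrArg List.tail hdrop
        simp only [List.tail_drop, List.tail_cons] at h2
        rw [show k + 1 + 2 = k + 2 + 1 from by omega]
        exact h2.symm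
      have hguard : ((k : Int) + 2 < ((l.map PySem.Str.strip).length : Int)) := by
        simp only [List.length_map]
        exact_mod_cast by omega
      have hget : (PySem.List.pyGet? (l.map PySem.Str.strip) ((k : Int) + 2)).getD ""
          = PySem.Str.strip a := by
        rw [show ((k : Int) + 2) = ((k + 2 : Nat) : Int) from by push_cast; ring,
          PySem.List.pyGet?_natCast]
        simp [List.getElem?_map, ha]
      by_cases hcond : PySem.Str.strip y = ""
      · simp only [pv_strip_idem]
        rw [if_pos hcond, if_pos hguard, hget, hk1, ih (k + 1) hys _]
        simp [hys, hrest, hcond, pv_strip_idem]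
      · simp only [pv_strip_idem]
        rw [if_neg hcond, hk1, ih (k + 1) hys acc]
        simp [hys, hrest, hcond]

-- A equals the reference value.
theorem pv_A_eq_zipSpec (l : List String) :
    format_instagram_comments l = pvZipSpec l := by
  unfold format_instagram_comments pvZipSpec
  have h := pv_fold_aux l l 0 (by simp) []
  simpa using h

-- B-side loop invariant: the reverse fold returns the reversed reference value
-- together with the stripped first and second elements of the list scanned so far.
theorem pv_B_fold_aux (l : List String) :
    l.reverse.foldl pvBStep ([], none, none)
      = ((pvZipSpec l).reverse, l.head?.map PySem.Str.strip, l[1]?.map PySem.Str.strip) := by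
  rw [List.foldl_reverse]
  induction l with
  | nil => simp [pvZipSpec]
  | cons x xs ih =>
    rw [List.foldr_cons, ih]
    rcases xs with _ | ⟨y, xs'⟩
    · simp [pvBStep, pvZipSpec]
    rcases xs' with _ | ⟨a, rest⟩
    · simp [pvBStep, pvZipSpec]
    -- xs = y :: a :: rest : the lookahead buffer holds strip a
    show pvBStep ((pvZipSpec (y :: a :: rest)).reverse,
        some (PySem.Str.strip y), some (PySem.Str.strip a)) x = _
    simp only [pvBStep, pvZipSpec]
    by_cases hcond : PySem.Str.strip x = ""
    · simp [hcond]
    · simp [hcond]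

-- B equals the reference value.
theorem pv_B_eq_zipSpec (l : List String) :
    format_instagram_comments_alt l = pvZipSpec l := by
  unfold format_instagram_comments_alt
  rw [pv_B_fold_aux]
  simp

-- ===== VERDICT (by name: the statement is the Claim_ definition above) =====
theorem format_instagram_comments_spec : Claim_equal_format_instagram_comments := by
  intro instagram _
  unfold Spec_format_instagram_comments
  rw [pv_A_eq_zipSpec, pv_B_eq_zipSpec]
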